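-- pv_equiv track=rewrite | github.com/wekesa/python_practise | algorithms/ms_codility_q2.py | solution
-- ===== SOURCE A (Python) =====
-- def solution(blocks):
--     """
--     - Algorithms/ Steps followed to solve this problem
--     1) Distance calculated by K - J+1 (J<=K)
--     2) Can only jump adjacent block, second block greater or equal next block
--     3) Using brute force approach
--     4) Iterate to get the distances that a frog can jump for each index
--     5) Return maximum value
--     6) Time Complexity O(n*n)
--     6) Space Complexity O(n)
--     :return:
--     """
--     # Stores the forward steps that can be made by a frog
--     forward_steps = 0
--     # Stores backward moves that can be made
--     backward_steps = 0
--
--     # Iterate through to get maximum gap among the blocks in which the frog can jump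
--     for position, block in enumerate(blocks):
--         # keep track of the current position
--         current_position = position
--         # Compute forward steps that can be made from the current position
--         while len(blocks) - 1 != position and blocks[position] <= blocks[position + 1]:
--             forward_steps += 1
--             position += 1
--
--         position = current_position
--         # Compute backward steps that can be made from the current position
--         while position - 1 != -1 and blocks[position] <= blocks[position - 1]:
--             forward_steps += 1
--             position -= 1
--
--         forward_steps += 1
--         if forward_steps > backward_steps:
--             backward_steps = forward_steps
--             forward_steps = 0
--         else:
--             forward_steps = 0
--
--     return backward_steps
-- ===== SOURCE B (Python) =====
-- def solution(blocks):
--     n = len(blocks)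
--     # forward run lengths: steps we can jump rightwards from i
--     fwd = [0] * n
--     for i in range(n - 2, -1, -1):
--         if blocks[i] <= blocks[i + 1]:
--             fwd[i] = fwd[i + 1] + 1
--     # backward run lengths: steps we can jump leftwards from i
--     bwd = [0] * n
--     for i in range(1, n):
--         if blocks[i] <= blocks[i - 1]:
--             bwd[i] = bwd[i - 1] + 1
--     best = 0
--     for i in range(n):
--         best = max(best, fwd[i] + bwd[i] + 1)
--     return best
-- ===== Notes on version B (the rewrite author's own statement) =====
-- stated objective: faster
-- what changed: Replaced the per-index forward/backward while-scans by two linear passes that precompute forward and backward run lengths, then one pass taking max(fwd[i]+bwd[i]+1).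
import Mathlib
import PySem

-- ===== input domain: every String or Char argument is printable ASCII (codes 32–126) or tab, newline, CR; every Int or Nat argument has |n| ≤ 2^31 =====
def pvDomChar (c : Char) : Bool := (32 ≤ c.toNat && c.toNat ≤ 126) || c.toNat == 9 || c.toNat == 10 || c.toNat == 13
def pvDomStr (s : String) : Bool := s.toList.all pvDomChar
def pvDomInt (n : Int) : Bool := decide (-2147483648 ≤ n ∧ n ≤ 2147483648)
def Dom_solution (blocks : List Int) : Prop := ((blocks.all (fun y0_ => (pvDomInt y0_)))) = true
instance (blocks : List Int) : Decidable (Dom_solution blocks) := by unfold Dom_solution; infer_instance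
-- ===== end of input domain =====

-- B replaces A's per-index forward/backward while-scans (O(n^2)) by two linear passes
-- precomputing run lengths, then one pass taking max(fwd[i]+bwd[i]+1) (objective: faster).

-- ===== PORT A =====
-- A's inner forward while-loop: steps made rightwards from `pos`
-- (the guard `pos + 1 < bl.length` is A's `len(blocks) - 1 != position`, equivalent
-- for the in-range positions A visits, and makes the recursion total).
def fwdA (bl : List Int) (pos : Nat) : Int :=
  if pos + 1 < bl.length ∧ bl.getD pos 0 ≤ bl.getD (pos + 1) 0 then
    fwdA bl (pos + 1) + 1
  else 0
termination_by bl.length - pos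
decreasing_by omega

-- A's inner backward while-loop: steps made leftwards from `pos`
def bwdA (bl : List Int) : Nat → Int
  | 0 => 0
  | p + 1 => if bl.getD (p + 1) 0 ≤ bl.getD p 0 then bwdA bl p + 1 else 0

def solution (blocks : List Int) : Int :=
  ((List.range blocks.length).foldl
    (fun (st : Int × Int) pos =>
      let f := st.1 + fwdA blocks pos
      let f := f + bwdA blocks pos
      let f := f + 1
      if f > st.2 then ((0 : Int), f) else (0, st.2))
    (0, 0)).2

-- ===== PORT B =====
-- forward run lengths, built right-to-left (B's downward for-loop)
def runsFwd : List Int → List Int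
  | [] => []
  | [_] => [0]
  | a :: b :: rest =>
    let r := runsFwd (b :: rest)
    (if a ≤ b then r.headD 0 + 1 else 0) :: r

-- backward run lengths, built left-to-right carrying previous element and its run
def bwdAux (prev prevRun : Int) : List Int → List Int
  | [] => []
  | x :: rest =>
    let r := if x ≤ prev then prevRun + 1 else 0
    r :: bwdAux x r rest

def runsBwd : List Int → List Int
  | [] => []
  | x :: rest => 0 :: bwdAux x 0 rest

def solution_alt (blocks : List Int) : Int :=
  (List.zipWith (fun f b => f + b + 1) (runsFwd blocks) (runsBwd blocks)).foldl max 0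

-- ===== PRECONDITION & SPEC =====
def Spec_solution (blocks : List Int) (out : Int) : Prop := out = solution_alt blocks
instance (blocks : List Int) (out : Int) : Decidable (Spec_solution blocks out) := by unfold Spec_solution; infer_instance

-- ===== CLAIM (what is proved, stated in full; the proofs are below) =====
def Claim_equal_solution : Prop := ∀ (blocks : List Int), Dom_solution blocks → Spec_solution blocks (solution blocks)

-- ===== LEMMAS AND PROOFS =====

lemma fwdA_cons (a : Int) (bl : List Int) :
    ∀ (k i : Nat), bl.length - i ≤ k → fwdA (a :: bl) (i + 1) = fwdA bl i := by
  intro k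
  induction k with
  | zero =>
    intro i h
    conv_lhs => rw [fwdA]
    conv_rhs => rw [fwdA]
    simp only [List.length_cons, List.getD_cons_succ]
    rw [if_neg (by rintro ⟨h', _⟩; omega), if_neg (by rintro ⟨h', _⟩; omega)]
  | succ k ih =>
    intro i h
    conv_lhs => rw [fwdA]
    conv_rhs => rw [fwdA]
    simp only [List.length_cons, List.getD_cons_succ]
    by_cases hc : i + 1 < bl.length ∧ bl.getD i 0 ≤ bl.getD (i + 1) 0
    · rw [if_pos ⟨by omega, hc.2⟩, if_pos hc, ih (i + 1) (by omega)]
    · rw [if_neg (by rintro ⟨h1, h2⟩; exact hc ⟨by omega, h2⟩), if_neg hc]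

lemma runsFwd_eq : ∀ (bl : List Int), runsFwd bl = (List.range bl.length).map (fun i => fwdA bl i) := by
  intro bl
  induction bl with
  | nil => simp [runsFwd]
  | cons a tl ih =>
    cases tl with
    | nil =>
      have h1 : fwdA [a] 0 = 0 := by rw [fwdA]; norm_num
      simp [runsFwd, h1]
    | cons b rest =>
      rw [runsFwd, ih]
      rw [show (a :: b :: rest).length = (b :: rest).length + 1 from rfl,
          List.range_succ_eq_map, List.map_cons, List.map_map]
      have hshift : ((fun i => fwdA (a :: b :: rest) i) ∘ Nat.succ) = fun i => fwdA (b :: rest) i := by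
        funext i
        exact fwdA_cons a (b :: rest) ((b :: rest).length) i (by omega)
      rw [hshift]
      have hhead : ((List.range (b :: rest).length).map (fun i => fwdA (b :: rest) i)).headD 0
          = fwdA (b :: rest) 0 := by
        rw [show (b :: rest).length = rest.length + 1 from rfl, List.range_succ_eq_map]
        simp
      have h0 : fwdA (a :: b :: rest) 0 = if a ≤ b then fwdA (b :: rest) 0 + 1 else 0 := by
        conv_lhs => rw [fwdA]
        have hsh : fwdA (a :: b :: rest) 1 = fwdA (b :: rest) 0 :=
          fwdA_cons a (b :: rest) ((b :: rest).length) 0 (by omega)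
        by_cases hab : a ≤ b
        · rw [if_pos ⟨by simp, by simpa using hab⟩, if_pos hab, hsh]
        · rw [if_neg (by rintro ⟨_, h2⟩; exact hab (by simpa using h2)), if_neg hab]
      rw [hhead, h0]

lemma bwdAux_spec (BL : List Int) :
    ∀ (k p : Nat), BL.length - (p + 1) = k → p < BL.length →
    bwdAux (BL.getD p 0) (bwdA BL p) (BL.drop (p + 1))
      = (List.range' (p + 1) (BL.length - (p + 1))).map (fun i => bwdA BL i) := by
  intro k
  induction k with
  | zero =>
    intro p hk hp
    rw [hk, List.drop_eq_nil_of_le (by omega)]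
    simp [bwdAux]
  | succ k ih =>
    intro p hk hp
    have hp1 : p + 1 < BL.length := by omega
    have hd : BL.drop (p + 1) = BL.getD (p + 1) 0 :: BL.drop (p + 2) := by
      rw [List.drop_eq_getElem_cons hp1, List.getD_eq_getElem BL 0 hp1]
    rw [hd]
    simp only [bwdAux]
    have hr : (if BL.getD (p + 1) 0 ≤ BL.getD p 0 then bwdA BL p + 1 else 0) = bwdA BL (p + 1) := rfl
    rw [hr, hk, List.range'_succ, List.map_cons]
    congr 1
    have h2 : BL.length - (p + 1 + 1) = k := by omega
    have := ih (p + 1) h2 hp1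
    rw [h2] at this
    exact this

lemma runsBwd_eq : ∀ (BL : List Int), runsBwd BL = (List.range BL.length).map (fun i => bwdA BL i) := by
  intro BL
  cases BL with
  | nil => simp [runsBwd]
  | cons x rest =>
    rw [runsBwd]
    have h0 : bwdAux x 0 rest
        = bwdAux ((x :: rest).getD 0 0) (bwdA (x :: rest) 0) ((x :: rest).drop 1) := rfl
    rw [h0, bwdAux_spec (x :: rest) ((x :: rest).length - 1) 0 rfl (by simp)]
    rw [show (x :: rest).length = rest.length + 1 from rfl, List.range_eq_range',
        List.range'_succ, List.map_cons]
    simp [bwdA]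

lemma zipWith_self {α β : Type} (f : α → α → β) :
    ∀ (l : List α), List.zipWith f l l = l.map (fun a => f a a) := by
  intro l; induction l with
  | nil => rfl
  | cons a tl ih => simp

lemma foldA (bl : List Int) :
    ∀ (l : List Nat) (m : Int),
    (l.foldl (fun (st : Int × Int) pos =>
        let f := st.1 + fwdA bl pos
        let f := f + bwdA bl pos
        let f := f + 1
        if f > st.2 then ((0 : Int), f) else (0, st.2)) (0, m)).2
      = l.foldl (fun m i => max m (fwdA bl i + bwdA bl i + 1)) m := by
  intro l
  induction l with
  | nil => intro m; rfl
  | cons i l ih =>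
    intro m
    simp only [List.foldl_cons]
    have hstep : (if 0 + fwdA bl i + bwdA bl i + 1 > m
          then ((0 : Int), 0 + fwdA bl i + bwdA bl i + 1) else ((0 : Int), m))
        = ((0 : Int), max m (fwdA bl i + bwdA bl i + 1)) := by
      split_ifs with h
      · rw [max_eq_right (by omega)]; norm_num
      · rw [max_eq_left (by omega)]
    rw [hstep, ih]

-- ===== VERDICT (by name: the statement is the Claim_ definition above) =====
theorem solution_spec : Claim_equal_solution := by
  intro blocks _
  unfold Spec_solution solution solution_alt
  rw [foldA blocks (List.range blocks.length) 0,
      runsFwd_eq, runsBwd_eq, List.zipWith_map, zipWith_self, List.foldl_map]
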